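-- pv_equiv track=rewrite | github.com/daiti-m/textmodel | doc/recur.py | find
-- ===== SOURCE A (Python) =====
-- def find (words, keyword):
--     N = len(words)
--     half = int (N/2)
--     train,test = words[0:half], words[half:]
--     istrain = sum ([word == keyword for word in train])
--     istest  = sum ([word == keyword for word in test])
--     a = (istrain > 0) and (istest > 0)
--     b = (istrain > 0) and (istest == 0)
--     c = (istrain == 0) and (istest > 0)
--     d = (istrain == 0) and (istest == 0)
--     return list (map (int, [a,b,c,d]))
-- ===== SOURCE B (Python) =====
-- def find(words, keyword):
--     half = len(words) // 2
--     mask = 0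
--     for i, w in enumerate(words):
--         if w == keyword:
--             mask |= 1 if i < half else 2
--     return [[0, 0, 0, 1], [0, 1, 0, 0], [0, 0, 1, 0], [1, 0, 0, 0]][mask]
-- ===== Notes on version B (the rewrite author's own statement) =====
-- stated objective: alternative
-- what changed: Single enumerate pass over the whole list accumulating a 2-bit match mask (bit 1 = hit in first half, bit 2 = hit in second half), then one table lookup of the one-hot row, instead of slicing into two halves, summing two boolean comprehensions and forming four explicit conjunctions.
import Mathlib
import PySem

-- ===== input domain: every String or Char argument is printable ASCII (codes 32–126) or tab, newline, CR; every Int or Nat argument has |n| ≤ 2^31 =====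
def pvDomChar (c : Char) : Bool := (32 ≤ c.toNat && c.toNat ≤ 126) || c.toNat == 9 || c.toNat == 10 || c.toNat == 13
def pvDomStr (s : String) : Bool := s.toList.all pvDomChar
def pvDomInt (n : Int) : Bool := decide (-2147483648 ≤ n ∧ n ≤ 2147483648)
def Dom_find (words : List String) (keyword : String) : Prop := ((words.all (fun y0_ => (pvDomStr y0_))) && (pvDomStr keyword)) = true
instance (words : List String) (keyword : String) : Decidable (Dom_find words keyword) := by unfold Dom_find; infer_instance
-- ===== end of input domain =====

-- B replaces A's two slices + comprehension-sums + four conjunctions by a single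
-- enumerate pass building a 2-bit match mask and one table-row lookup (objective: alternative).


-- ===== PORT A =====
def find (words : List String) (keyword : String) : List Int :=
  let N : Nat := words.length
  let half : Nat := N / 2          -- int(N/2) with N ≥ 0 is floor division
  let train := PySem.List.slice words (some (0 : Int)) (some (half : Int))
  let test := PySem.List.slice words (some (half : Int)) none
  let istrain : Int := (train.map (fun word => if word == keyword then (1 : Int) else 0)).sum
  let istest : Int := (test.map (fun word => if word == keyword then (1 : Int) else 0)).sum
  let a : Bool := decide (istrain > 0) && decide (istest > 0)
  let b : Bool := decide (istrain > 0) && decide (istest = 0)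
  let c : Bool := decide (istrain = 0) && decide (istest > 0)
  let d : Bool := decide (istrain = 0) && decide (istest = 0)
  [a, b, c, d].map (fun x => if x then (1 : Int) else 0)

-- ===== PORT B =====
-- the 'for i, w in enumerate(words)' loop, as the obvious structural recursion over
-- the same state (index i, mask m)
def findAltLoop (keyword : String) (half : Nat) : List String → Nat → Nat → Nat
  | [], _, m => m
  | w :: ws, i, m =>
    findAltLoop keyword half ws (i + 1)
      (if w == keyword then m ||| (if i < half then 1 else 2) else m)

def find_alt (words : List String) (keyword : String) : List Int :=
  let half : Nat := words.length / 2
  let mask : Nat := findAltLoop keyword half words 0 0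
  -- mask is an OR of bits 1 and 2, so mask ∈ {0,1,2,3} and the Python literal-list
  -- index is always in range; ported as a four-way match (last case is mask = 3)
  match mask with
  | 0 => [0, 0, 0, 1]
  | 1 => [0, 1, 0, 0]
  | 2 => [0, 0, 1, 0]
  | _ => [1, 0, 0, 0]

-- ===== PRECONDITION & SPEC =====
def Spec_find (words : List String) (keyword : String) (out : List Int) : Prop := out = find_alt words keyword
instance (words : List String) (keyword : String) (out : List Int) : Decidable (Spec_find words keyword out) := by unfold Spec_find; infer_instance

-- ===== CLAIM (what is proved, stated in full; the proofs are below) =====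
def Claim_equal_find : Prop := ∀ (words : List String) (keyword : String), Dom_find words keyword → Spec_find words keyword (find words keyword)

-- ===== LEMMAS AND PROOFS =====

-- every summand of A's comprehension sum is 0 or 1, so the sum is nonnegative
theorem pv_sum_nonneg (l : List String) (k : String) :
    0 ≤ (l.map (fun w => if w == k then (1 : Int) else 0)).sum := by
  apply List.sum_nonneg; intro y hy
  simp only [List.mem_map] at hy
  obtain ⟨w, _, rfl⟩ := hy
  split <;> omega

-- A's comprehension sum is positive exactly when some element equals the keyword
theorem pv_sum_pos_iff_any (l : List String) (k : String) :
    0 < (l.map (fun w => if w == k then (1 : Int) else 0)).sum ↔ l.any (fun w => w == k) = true := by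
  induction l with
  | nil => simp
  | cons x xs ih =>
    simp only [List.map_cons, List.sum_cons, List.any_cons, Bool.or_eq_true]
    have h0 := pv_sum_nonneg xs k
    by_cases h : (x == k) = true
    · rw [if_pos h]
      exact ⟨fun _ => Or.inl h, fun _ => by omega⟩
    · rw [if_neg h, zero_add, ih]
      exact ⟨Or.inr, fun hor => hor.elim (fun hx => absurd hx h) id⟩

-- closed form of B's loop: the mask is the OR of the two half-membership bits
theorem pv_loop_spec (k : String) (half : Nat) (l : List String) (i m : Nat) :
    findAltLoop k half l i m
      = m ||| ((cond ((l.take (half - i)).any (fun w => w == k)) 1 0)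
                ||| (cond ((l.drop (half - i)).any (fun w => w == k)) 2 0)) := by
  induction l generalizing i m with
  | nil => simp [findAltLoop]
  | cons w ws ih =>
    rw [findAltLoop, ih]
    by_cases hi : i < half
    · have hsub : half - i = (half - (i + 1)) + 1 := by omega
      rw [hsub, List.take_succ_cons, List.drop_succ_cons, List.any_cons]
      by_cases hw : (w == k) = true <;>
        by_cases hs : ((ws.take (half - (i + 1))).any (fun w => w == k)) = true <;>
        by_cases ht : ((ws.drop (half - (i + 1))).any (fun w => w == k)) = true <;>
        simp [hw, hs, ht, hi, Nat.lor_assoc]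
    · have hsub0 : half - i = 0 := by omega
      have hsub1 : half - (i + 1) = 0 := by omega
      rw [hsub0, hsub1, List.take_zero, List.take_zero, List.drop_zero, List.drop_zero,
        List.any_cons]
      by_cases hw : (w == k) = true <;>
        by_cases ht : (ws.any (fun w => w == k)) = true <;>
        simp [hw, ht, hi]

-- ===== VERDICT (by name: the statement is the Claim_ definition above) =====
theorem find_spec : Claim_equal_find := by
  intro words keyword _
  unfold Spec_find find find_alt
  simp only [PySem.List.slice_zero_start, PySem.List.slice_to_natCast, PySem.List.slice_from_natCast]
  rw [pv_loop_spec]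
  set half := words.length / 2 with hhalf
  rw [Nat.sub_zero, Nat.zero_or]
  set str := (List.map (fun w => if w == keyword then (1 : Int) else 0) (words.take half)).sum with hstr
  set ste := (List.map (fun w => if w == keyword then (1 : Int) else 0) (words.drop half)).sum with hste
  have htr := pv_sum_pos_iff_any (words.take half) keyword
  have hte := pv_sum_pos_iff_any (words.drop half) keyword
  have htr0 := pv_sum_nonneg (words.take half) keyword
  have hte0 := pv_sum_nonneg (words.drop half) keyword
  rw [← hstr] at htr htr0
  rw [← hste] at hte hte0
  by_cases hs : (words.take half).any (fun w => w == keyword) = true <;>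
  by_cases ht : (words.drop half).any (fun w => w == keyword) = true
  · have e1 : decide (str > 0) = true := decide_eq_true (htr.mpr hs)
    have e2 : decide (str = 0) = false := decide_eq_false (by have := htr.mpr hs; omega)
    have e3 : decide (ste > 0) = true := decide_eq_true (hte.mpr ht)
    have e4 : decide (ste = 0) = false := decide_eq_false (by have := hte.mpr ht; omega)
    simp only [hs, ht, e1, e2, e3, e4, cond_true]
    rfl
  · have hte' : ste = 0 := by have := (not_iff_not.mpr hte).mpr ht; omega
    have e1 : decide (str > 0) = true := decide_eq_true (htr.mpr hs)
    have e2 : decide (str = 0) = false := decide_eq_false (by have := htr.mpr hs; omega)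
    have e3 : decide (ste > 0) = false := decide_eq_false (by omega)
    have e4 : decide (ste = 0) = true := decide_eq_true hte'
    simp only [hs, ht, e1, e2, e3, e4, cond_true, cond_false]
    rfl
  · have htr' : str = 0 := by have := (not_iff_not.mpr htr).mpr hs; omega
    have e1 : decide (str > 0) = false := decide_eq_false (by omega)
    have e2 : decide (str = 0) = true := decide_eq_true htr'
    have e3 : decide (ste > 0) = true := decide_eq_true (hte.mpr ht)
    have e4 : decide (ste = 0) = false := decide_eq_false (by have := hte.mpr ht; omega)
    simp only [hs, ht, e1, e2, e3, e4, cond_true, cond_false]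
    rfl
  · have htr' : str = 0 := by have := (not_iff_not.mpr htr).mpr hs; omega
    have hte' : ste = 0 := by have := (not_iff_not.mpr hte).mpr ht; omega
    have e1 : decide (str > 0) = false := decide_eq_false (by omega)
    have e2 : decide (str = 0) = true := decide_eq_true htr'
    have e3 : decide (ste > 0) = false := decide_eq_false (by omega)
    have e4 : decide (ste = 0) = true := decide_eq_true hte'
    simp only [hs, ht, e1, e2, e3, e4, cond_false]
    rfl
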